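-- pv_equiv track=rewrite | github.com/Willianan/Interview_Book | huawei/60_查找组成一个偶数最接近的两个素数.py | func
-- ===== SOURCE A (Python) =====
-- def judge(number):
-- 	for i in range(2, number // 2 + 1):
-- 		if number % i == 0:
-- 			return False
-- 	return True
--
-- def func(n):
-- 	res = []
-- 	if n == 4:
-- 		res = [2, 2]
-- 	else:
-- 		for i in range(n // 2, n):
-- 			if judge(i) and judge(n - i):
-- 				res = [n - i, i]
-- 				break
-- 	return res
-- ===== SOURCE B (Python) =====
-- # Alternative algorithm: Sieve of Eratosthenes table + one scan instead of repeated trial-division tests.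
-- # Note: indices 0 and 1 are left True in the sieve, matching the original judge(),
-- # which returns True for 0 and 1 (its trial-division range is empty there).
-- def func(n):
--     if n < 1:
--         return []
--     sieve = [True] * (n + 1)
--     p = 2
--     while p * p <= n:
--         m = p * p
--         while m <= n:
--             sieve[m] = False
--             m += p
--         p += 1
--     for i in range(n // 2, n):
--         if sieve[i] and sieve[n - i]:
--             return [n - i, i]
--     return []
-- ===== Notes on version B (the rewrite author's own statement) =====
-- stated objective: alternative
-- what changed: Replaces per-candidate trial-division primality tests (judge) with one precomputed Sieve of Eratosthenes boolean table followed by a single scan from n//2, dropping the redundant n==4 branch.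
import Mathlib
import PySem

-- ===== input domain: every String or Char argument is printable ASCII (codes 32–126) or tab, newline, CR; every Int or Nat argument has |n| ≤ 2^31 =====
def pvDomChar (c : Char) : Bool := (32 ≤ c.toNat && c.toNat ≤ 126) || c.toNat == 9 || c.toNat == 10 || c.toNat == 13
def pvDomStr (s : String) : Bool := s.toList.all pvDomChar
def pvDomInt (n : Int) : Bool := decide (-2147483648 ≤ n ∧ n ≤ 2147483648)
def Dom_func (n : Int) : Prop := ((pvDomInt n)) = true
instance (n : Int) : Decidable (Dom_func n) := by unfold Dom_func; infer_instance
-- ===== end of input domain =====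

-- B replaces A's per-candidate trial division with one Sieve of Eratosthenes table plus a single scan.

-- ===== PORT A =====
-- judge: trial division over range(2, number//2+1) with early return False = List.all
def judge (number : Int) : Bool :=
  (PySem.List.pyRange 2 (PySem.Int.floordiv number 2 + 1) 1).all
    (fun i => !(PySem.Int.mod number i == 0))

def func (n : Int) : List Int :=
  if n == 4 then [2, 2]
  else
    match (PySem.List.pyRange (PySem.Int.floordiv n 2) n 1).find?
        (fun i => judge i && judge (n - i)) with
    | some i => [n - i, i]
    | none => []

-- ===== PORT B =====
-- inner while of Source B: mark m, m+p, … ≤ N as composite ('2 ≤ p' only makes termination evident; p is always ≥ 2 at call sites)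
def markMultiples (N p m : Nat) (arr : Array Bool) : Array Bool :=
  if _h : 2 ≤ p ∧ m ≤ N then
    markMultiples N p (m + p) (arr.setIfInBounds m false)
  else arr
termination_by N + 1 - m
decreasing_by omega

-- outer while of Source B: for p while p*p ≤ N mark multiples of p from p*p
def sieveLoop (N p : Nat) (arr : Array Bool) : Array Bool :=
  if _h : p * p ≤ N then
    sieveLoop N (p + 1) (markMultiples N p (p * p) arr)
  else arr
termination_by N + 1 - p
decreasing_by
  have : p ≤ N := by nlinarith
  omega

def func_alt (n : Int) : List Int :=
  if n < 1 then []
  else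
    let N := n.toNat
    let sieve := sieveLoop N 2 (Array.replicate (N + 1) true)
    -- scan i in range(n//2, n); sieve[...] indexing is in bounds, ported with getD
    match (PySem.List.pyRange (PySem.Int.floordiv n 2) n 1).find?
        (fun i => sieve.getD i.toNat false && sieve.getD (n - i).toNat false) with
    | some i => [n - i, i]
    | none => []

-- ===== PRECONDITION & SPEC =====
def Spec_func (n : Int) (out : List Int) : Prop := out = func_alt n
instance (n : Int) (out : List Int) : Decidable (Spec_func n out) := by unfold Spec_func; infer_instance

-- ===== CLAIM (what is proved, stated in full; the proofs are below) =====
def Claim_equal_func : Prop := ∀ (n : Int), Dom_func n → Spec_func n (func n)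

-- ===== LEMMAS AND PROOFS =====

theorem size_markMultiples (N p m : Nat) (arr : Array Bool) :
    (markMultiples N p m arr).size = arr.size := by
  fun_induction markMultiples N p m arr with
  | case1 m arr h ih => simpa using ih
  | case2 => rfl

theorem getD_setIfInBounds (a : Array Bool) (i j : Nat) (v : Bool) :
    (a.setIfInBounds i v).getD j false = if i = j ∧ j < a.size then v else a.getD j false := by
  rw [Array.getD_eq_getD_getElem?, Array.getD_eq_getD_getElem?, Array.getElem?_setIfInBounds]
  by_cases hij : i = j
  · subst hij
    by_cases hs : i < a.size
    · simp [hs]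
    · simp [hs]
  · simp [hij]

theorem getD_markMultiples (N p m k : Nat) (arr : Array Bool)
    (hp : 2 ≤ p) (hsize : arr.size = N + 1) (hk : k ≤ N) :
    (markMultiples N p m arr).getD k false
      = (arr.getD k false && !decide (m ≤ k ∧ p ∣ (k - m))) := by
  fun_induction markMultiples N p m arr with
  | case1 m arr h ih =>
    rw [ih (by simpa using hsize)]
    rw [getD_setIfInBounds]
    by_cases hkm : m = k
    · subst hkm
      have hlt : m < arr.size := by omega
      simp [hlt]
    · have hiff : (m + p ≤ k ∧ p ∣ k - (m + p)) ↔ (m ≤ k ∧ p ∣ (k - m)) := by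
        constructor
        · rintro ⟨h1, j, hj⟩
          refine ⟨by omega, j + 1, ?_⟩
          have : p * (j + 1) = p * j + p := by ring
          omega
        · rintro ⟨h1, j, hj⟩
          cases j with
          | zero => exfalso; omega
          | succ j' =>
            have : p * (j' + 1) = p * j' + p := by ring
            refine ⟨by omega, j', by omega⟩
      have hne : ¬ (m = k ∧ k < arr.size) := fun hc => hkm hc.1
      rw [if_neg hne, decide_eq_decide.2 hiff]
  | case2 m arr h =>
    have hm : N < m := by omega
    have : ¬ (m ≤ k ∧ p ∣ (k - m)) := fun hc => by omega
    simp [this]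

theorem getD_sieveLoop (N p k : Nat) (arr : Array Bool)
    (hp : 2 ≤ p) (hsize : arr.size = N + 1) (hk : k ≤ N) :
    ((sieveLoop N p arr).getD k false = false)
      ↔ (arr.getD k false = false ∨ ∃ d, p ≤ d ∧ d * d ≤ k ∧ d ∣ k) := by
  fun_induction sieveLoop N p arr with
  | case1 p arr h ih =>
    rw [ih (by omega) (by rw [size_markMultiples]; exact hsize)]
    rw [getD_markMultiples N p (p * p) k arr hp hsize hk]
    have hiff : (p * p ≤ k ∧ p ∣ (k - p * p)) ↔ (p * p ≤ k ∧ p ∣ k) := by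
      constructor
      · rintro ⟨h1, j, hj⟩
        refine ⟨h1, j + p, ?_⟩
        have : p * (j + p) = p * j + p * p := by ring
        omega
      · rintro ⟨h1, j, hj⟩
        have hjp : p ≤ j := by nlinarith
        refine ⟨h1, j - p, ?_⟩
        have : p * (j - p) = p * j - p * p := Nat.mul_sub p j p
        omega
    have hmark : (arr.getD k false && !decide (p * p ≤ k ∧ p ∣ (k - p * p))) = false
        ↔ (arr.getD k false = false ∨ (p * p ≤ k ∧ p ∣ k)) := by
      rw [← hiff]
      cases harr : arr.getD k false <;> by_cases hc : (p * p ≤ k ∧ p ∣ (k - p * p)) <;> simp [hc]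
    rw [hmark]
    constructor
    · rintro ((ha | hpk) | ⟨d, hd1, hd2, hd3⟩)
      · exact Or.inl ha
      · exact Or.inr ⟨p, le_refl _, hpk.1, hpk.2⟩
      · exact Or.inr ⟨d, by omega, hd2, hd3⟩
    · rintro (ha | ⟨d, hd1, hd2, hd3⟩)
      · exact Or.inl (Or.inl ha)
      · by_cases hdp : d = p
        · subst hdp; exact Or.inl (Or.inr ⟨hd2, hd3⟩)
        · exact Or.inr ⟨d, by omega, hd2, hd3⟩
  | case2 p arr h =>
    constructor
    · exact Or.inl
    · rintro (ha | ⟨d, hd1, hd2, hd3⟩)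
      · exact ha
      · exfalso
        have : p * p ≤ d * d := Nat.mul_le_mul hd1 hd1
        omega

theorem sieve_final (N k : Nat) (hk : k ≤ N) :
    ((sieveLoop N 2 (Array.replicate (N + 1) true)).getD k false = false)
      ↔ ∃ d, 2 ≤ d ∧ d * d ≤ k ∧ d ∣ k := by
  rw [getD_sieveLoop N 2 k _ (le_refl 2) (by simp) hk]
  have hinit : (Array.replicate (N + 1) true).getD k false = true := by
    rw [Array.getD_eq_getD_getElem?]
    rw [Array.getElem?_replicate]
    simp [Nat.lt_succ_of_le hk]
  simp [hinit]

theorem judge_char (k : Nat) :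
    judge (k : Int) = true ↔ ¬ ∃ d, 2 ≤ d ∧ d ≤ k / 2 ∧ d ∣ k := by
  have hfd : PySem.Int.floordiv (k : Int) 2 = ((k / 2 : Nat) : Int) := by
    exact_mod_cast PySem.Int.floordiv_natCast k 2
  rw [judge, hfd, List.all_eq_true]
  constructor
  · rintro hall ⟨d, hd2, hdk, hdvd⟩
    have hmem : ((d : Int)) ∈ PySem.List.pyRange 2 (((k / 2 : Nat) : Int) + 1) 1 := by
      rw [PySem.List.mem_pyRange_one]
      constructor
      · exact_mod_cast hd2
      · push_cast
        omega
    have hval := hall _ hmem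
    simp only [Bool.not_eq_eq_eq_not, Bool.not_true, beq_eq_false_iff_ne, ne_eq] at hval
    exact hval ((PySem.Int.mod_eq_zero_iff_dvd _ _).2 (Int.natCast_dvd_natCast.2 hdvd))
  · intro hno i hi
    rw [PySem.List.mem_pyRange_one] at hi
    simp only [Bool.not_eq_eq_eq_not, Bool.not_true, beq_eq_false_iff_ne, ne_eq]
    intro hmod
    have hdvd : i ∣ (k : Int) := (PySem.Int.mod_eq_zero_iff_dvd _ _).1 hmod
    have h0 : 0 ≤ i := by omega
    obtain ⟨d, rfl⟩ := Int.eq_ofNat_of_zero_le h0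
    refine hno ⟨d, ?_, ?_, ?_⟩
    · exact_mod_cast hi.1
    · have : (d : Int) ≤ ((k / 2 : Nat) : Int) := by omega
      exact_mod_cast this
    · exact_mod_cast hdvd

theorem divisor_iff (k : Nat) :
    (∃ d, 2 ≤ d ∧ d ≤ k / 2 ∧ d ∣ k) ↔ (∃ d, 2 ≤ d ∧ d * d ≤ k ∧ d ∣ k) := by
  constructor
  · rintro ⟨d, hd2, hdk2, hdvd⟩
    have h2d : d * 2 ≤ k := (Nat.le_div_iff_mul_le (by norm_num)).1 hdk2
    by_cases hdd : d * d ≤ k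
    · exact ⟨d, hd2, hdd, hdvd⟩
    · obtain ⟨e, he⟩ := hdvd
      refine ⟨e, ?_, ?_, ⟨d, by rw [he, Nat.mul_comm]⟩⟩
      · nlinarith
      · nlinarith
  · rintro ⟨d, hd2, hdd, hdvd⟩
    obtain ⟨e, he⟩ := hdvd
    refine ⟨d, hd2, ?_, ⟨e, he⟩⟩
    have hde : d ≤ e := by nlinarith
    exact (Nat.le_div_iff_mul_le (by norm_num)).2 (by nlinarith)

theorem sieve_eq_judge (N k : Nat) (hk : k ≤ N) :
    (sieveLoop N 2 (Array.replicate (N + 1) true)).getD k false = judge (k : Int) := by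
  by_cases h : ∃ d, 2 ≤ d ∧ d * d ≤ k ∧ d ∣ k
  · have h1 := (sieve_final N k hk).2 h
    have h2 : ¬ judge (k : Int) = true := by
      rw [judge_char, divisor_iff]; exact fun hc => hc h
    rw [h1, Bool.not_eq_true] at *
    exact h2.symm
  · have h1 : ¬ ((sieveLoop N 2 (Array.replicate (N + 1) true)).getD k false = false) :=
      fun hc => h ((sieve_final N k hk).1 hc)
    have h2 : judge (k : Int) = true :=
      (judge_char k).2 (fun hc => h ((divisor_iff k).1 hc))
    rw [h2, Bool.not_eq_false] at *
    exact h1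

-- find? respects pointwise-equal predicates
theorem find?_congr' {α : Type} (l : List α) (p q : α → Bool)
    (h : ∀ a ∈ l, p a = q a) : l.find? p = l.find? q := by
  induction l with
  | nil => rfl
  | cons x xs ih =>
    simp only [List.find?_cons]
    rw [h x (by simp)]
    cases q x
    · exact ih fun a ha => h a (by simp [ha])
    · rfl

theorem findA_eq_findB (n : Int) (hn : 1 ≤ n) :
    (PySem.List.pyRange (PySem.Int.floordiv n 2) n 1).find?
        (fun i => judge i && judge (n - i))
      = (PySem.List.pyRange (PySem.Int.floordiv n 2) n 1).find?
        (fun i => (sieveLoop n.toNat 2 (Array.replicate (n.toNat + 1) true)).getD i.toNat false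
          && (sieveLoop n.toNat 2 (Array.replicate (n.toNat + 1) true)).getD (n - i).toNat false) := by
  apply find?_congr'
  intro i hi
  rw [PySem.List.mem_pyRange_one] at hi
  have hfd0 : (0 : Int) ≤ PySem.Int.floordiv n 2 :=
    (PySem.Int.le_floordiv_iff_mul_le (by norm_num)).2 (by omega)
  have h0i : 0 ≤ i := le_trans hfd0 hi.1
  have h0ni : 0 ≤ n - i := by omega
  have hiN : i.toNat ≤ n.toNat := by omega
  have hniN : (n - i).toNat ≤ n.toNat := by omega
  obtain ⟨k1, rfl⟩ := Int.eq_ofNat_of_zero_le h0i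
  set m := (n - (k1 : Int)).toNat with hmdef
  have hm : n - (k1 : Int) = (m : Int) := by omega
  rw [hm]
  rw [← sieve_eq_judge n.toNat k1 (by omega), ← sieve_eq_judge n.toNat m (by omega)]
  rw [Int.toNat_natCast]

-- ===== VERDICT (by name: the statement is the Claim_ definition above) =====
theorem func_spec : Claim_equal_func := by
  intro n _
  show func n = func_alt n
  by_cases hn1 : n < 1
  · have h4 : ¬ ((n == 4) = true) := by simp only [beq_iff_eq]; omega
    have hge : n ≤ PySem.Int.floordiv n 2 :=
      (PySem.Int.le_floordiv_iff_mul_le (by norm_num)).2 (by omega)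
    rw [func, if_neg h4, func_alt, if_pos hn1, PySem.List.pyRange_one_eq_nil hge]
    rfl
  · replace hn1 : 1 ≤ n := by omega
    have key := findA_eq_findB n hn1
    by_cases hn4 : n = 4
    · subst hn4
      have hB : func_alt 4 = [2, 2] := by
        rw [func_alt, if_neg (by norm_num)]
        simp only []
        rw [← key]
        decide
      rw [hB, func]
      rfl
    · rw [func, if_neg (by simp only [beq_iff_eq]; exact hn4), func_alt, if_neg (by omega)]
      simp only []
      rw [key]
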